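-- pv_equiv track=rewrite | github.com/ema299/LorMonitor | pipeline/lib/loader.py | _strip_undone_events
-- ===== SOURCE A (Python) =====
-- def _strip_undone_events(logs):
--     """
--     Pre-processa i log rimuovendo eventi annullati da UNDO.
--     Pattern: EVENT → UNDO_REQUESTED (1+) → UNDO_ACCEPTED = rimuovi EVENT
--              EVENT → UNDO_REQUESTED (1+) → UNDO_DENIED   = tieni EVENT
--
--     Ritorna la lista di log pulita (senza UNDO_REQUESTED/ACCEPTED/DENIED
--     e senza gli eventi annullati).
--     """
--     # Tipi di eventi che possono essere "undone" (azioni del giocatore)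
--     UNDOABLE = {
--         'CARD_PLAYED', 'CARD_INKED', 'CARD_QUEST', 'CARD_ATTACK',
--         'ABILITY_TRIGGERED', 'ABILITY_ACTIVATED', 'DAMAGE_DEALT',
--         'CARD_PUT_INTO_INKWELL',
--         'CARD_DISCARDED', 'CARD_BOOSTED', 'SUPPORT_GIVEN',
--     }
--
--     cleaned = []
--     i = 0
--     while i < len(logs):
--         e = logs[i]
--         etype = e.get('type', '')
--
--         if etype == 'UNDO_REQUESTED':
--             # Cerca la risoluzione: UNDO_ACCEPTED o UNDO_DENIED
--             # Salta eventuali UNDO_REQUESTED consecutivi e TIMER_*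
--             j = i + 1
--             while j < len(logs):
--                 jtype = logs[j].get('type', '')
--                 if jtype == 'UNDO_ACCEPTED':
--                     # Rimuovi l'ultimo evento undoable dello stesso player
--                     undo_player = e.get('player')
--                     # Cerca all'indietro nell'output pulito
--                     removed = False
--                     for k in range(len(cleaned) - 1, -1, -1):
--                         if (cleaned[k].get('type', '') in UNDOABLE and
--                                 cleaned[k].get('player') == undo_player):
--                             cleaned.pop(k)
--                             removed = True
--                             break
--                     i = j + 1  # salta oltre UNDO_ACCEPTED
--                     break
--                 elif jtype == 'UNDO_DENIED':
--                     # L'azione resta, saltiamo solo i marker UNDO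
--                     i = j + 1
--                     break
--                 elif jtype == 'UNDO_REQUESTED':
--                     # UNDO multipli consecutivi, continua a cercare
--                     j += 1
--                 else:
--                     # TIMER_STARTED, TIMER_INCREMENT, etc — skip
--                     j += 1
--             else:
--                 # Nessuna risoluzione trovata, ignora l'UNDO
--                 i += 1
--             continue
--
--         elif etype in ('UNDO_ACCEPTED', 'UNDO_DENIED'):
--             # Orfani (già gestiti sopra), skip
--             i += 1
--             continue
--
--         cleaned.append(e)
--         i += 1
--
--     return cleaned
-- ===== SOURCE B (Python) =====
-- def _strip_undone_events(logs):
--     """Single-pass state machine over the log: a reversed pre-pass marks whether a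
--     resolution (UNDO_ACCEPTED/DENIED) exists after each position, then one forward
--     pass handles pending undos without any lookahead scans."""
--     UNDOABLE = {
--         'CARD_PLAYED', 'CARD_INKED', 'CARD_QUEST', 'CARD_ATTACK',
--         'ABILITY_TRIGGERED', 'ABILITY_ACTIVATED', 'DAMAGE_DEALT',
--         'CARD_PUT_INTO_INKWELL',
--         'CARD_DISCARDED', 'CARD_BOOSTED', 'SUPPORT_GIVEN',
--     }
--     # Pass 1 (right to left): flags[i] = a resolution occurs strictly after index i.
--     flags = []
--     seen = False
--     for e in reversed(logs):
--         flags.append(seen)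
--         if e.get('type', '') in ('UNDO_ACCEPTED', 'UNDO_DENIED'):
--             seen = True
--     flags.reverse()
--
--     # Pass 2: forward state machine.
--     cleaned = []
--     pending_active = False
--     pending_player = None
--     for e, f in zip(logs, flags):
--         t = e.get('type', '')
--         if pending_active:
--             if t == 'UNDO_ACCEPTED':
--                 for k in range(len(cleaned) - 1, -1, -1):
--                     if (cleaned[k].get('type', '') in UNDOABLE and
--                             cleaned[k].get('player') == pending_player):
--                         del cleaned[k]
--                         break
--                 pending_active = False
--             elif t == 'UNDO_DENIED':
--                 pending_active = False
--             # everything between an undo request and its resolution is dropped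
--         elif t == 'UNDO_REQUESTED':
--             if f:  # a resolution exists later: start pending, drop events until it
--                 pending_active = True
--                 pending_player = e.get('player')
--             # else: unresolved request, just drop the marker
--         elif t in ('UNDO_ACCEPTED', 'UNDO_DENIED'):
--             pass  # orphan marker
--         else:
--             cleaned.append(e)
--     return cleaned
-- ===== Notes on version B (the rewrite author's own statement) =====
-- stated objective: alternative
-- what changed: Replaced A's index-jumping loop with a per-request forward lookahead scan by a reversed pre-pass computing a has-resolution-after flag per position plus one forward state-machine pass (pending undo carried as state, no lookahead).
import Mathlib
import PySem

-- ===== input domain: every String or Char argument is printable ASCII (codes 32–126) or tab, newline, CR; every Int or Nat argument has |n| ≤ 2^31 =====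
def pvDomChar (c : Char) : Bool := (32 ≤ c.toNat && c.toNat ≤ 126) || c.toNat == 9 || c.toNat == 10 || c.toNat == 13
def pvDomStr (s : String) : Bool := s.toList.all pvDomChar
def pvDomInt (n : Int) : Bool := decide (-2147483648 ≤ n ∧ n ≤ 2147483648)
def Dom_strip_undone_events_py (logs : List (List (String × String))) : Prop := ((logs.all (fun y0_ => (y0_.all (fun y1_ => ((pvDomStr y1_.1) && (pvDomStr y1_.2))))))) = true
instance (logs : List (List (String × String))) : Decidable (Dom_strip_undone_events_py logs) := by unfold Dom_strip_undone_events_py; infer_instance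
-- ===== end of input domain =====

-- B replaces A's per-request forward lookahead (and index jumps) by a reversed pre-pass of
-- has-resolution-after flags plus one forward state-machine pass; alternative structure, same cost class.


-- shared event accessors (e.get('type',''), e.get('player'); dict lookup = first match)
def pvGetTy (e : List (String × String)) : String := ((PySem.Dict.mk e).get? "type").getD ""
def pvGetPl (e : List (String × String)) : Option String := (PySem.Dict.mk e).get? "player"

def pvUndoable : List String :=
  ["CARD_PLAYED", "CARD_INKED", "CARD_QUEST", "CARD_ATTACK",
   "ABILITY_TRIGGERED", "ABILITY_ACTIVATED", "DAMAGE_DEALT",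
   "CARD_PUT_INTO_INKWELL",
   "CARD_DISCARDED", "CARD_BOOSTED", "SUPPORT_GIVEN"]

-- the backward scan 'for k in range(len(cleaned)-1, -1, -1): … pop(k); break' of both Pythons:
-- remove the LAST entry that is undoable and belongs to player p
def pvPopLast : List (List (String × String)) → Option String → List (List (String × String))
  | [], _ => []
  | x :: rest, p =>
    if rest.any (fun y => pvUndoable.contains (pvGetTy y) && pvGetPl y == p) then
      x :: pvPopLast rest p
    else if pvUndoable.contains (pvGetTy x) && pvGetPl x == p then rest
    else x :: rest

-- ===== PORT A =====
-- A's inner 'while j < len(logs)' lookahead: offset just past the first resolution, and whether it accepted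
def pvScanRes : List (List (String × String)) → Option (Nat × Bool)
  | [] => none
  | e :: rest =>
    let t := pvGetTy e
    if t = "UNDO_ACCEPTED" then some (1, true)
    else if t = "UNDO_DENIED" then some (1, false)
    else
      match pvScanRes rest with
      | some (k, b) => some (k + 1, b)
      | none => none

-- A's outer 'while i < len(logs)' on the remaining suffix, with the cleaned accumulator
def pvLoopA : List (List (String × String)) → List (List (String × String)) → List (List (String × String))
  | [], cleaned => cleaned
  | e :: rest, cleaned =>
    let t := pvGetTy e
    if t = "UNDO_REQUESTED" then
      match pvScanRes rest with
      | some (k, true) => pvLoopA (rest.drop k) (pvPopLast cleaned (pvGetPl e))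
      | some (k, false) => pvLoopA (rest.drop k) cleaned
      | none => pvLoopA rest cleaned
    else if t = "UNDO_ACCEPTED" ∨ t = "UNDO_DENIED" then pvLoopA rest cleaned
    else pvLoopA rest (cleaned ++ [e])
  termination_by l _ => l.length
  decreasing_by all_goals (simp [List.length_drop]; try omega)

def strip_undone_events_py (logs : List (List (String × String))) : List (List (String × String)) :=
  pvLoopA logs []

-- ===== PORT B =====
def pvIsRes (e : List (String × String)) : Bool :=
  pvGetTy e = "UNDO_ACCEPTED" || pvGetTy e = "UNDO_DENIED"

-- B's pass 1 (reversed loop): per-position 'a resolution occurs strictly after me' flags,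
-- plus the running 'seen' value for the whole list
def pvFlags : List (List (String × String)) → List Bool × Bool
  | [] => ([], false)
  | e :: rest =>
    let (fs, seen) := pvFlags rest
    (seen :: fs, seen || pvIsRes e)

-- B's pass 2: forward state machine; pending = some p while an undo by player p awaits resolution
def pvLoopB : List ((List (String × String)) × Bool) → Option (Option String) →
    List (List (String × String)) → List (List (String × String))
  | [], _, cleaned => cleaned
  | (e, f) :: rest, pending, cleaned =>
    let t := pvGetTy e
    match pending with
    | some p =>
      if t = "UNDO_ACCEPTED" then pvLoopB rest none (pvPopLast cleaned p)
      else if t = "UNDO_DENIED" then pvLoopB rest none cleaned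
      else pvLoopB rest (some p) cleaned
    | none =>
      if t = "UNDO_REQUESTED" then
        if f then pvLoopB rest (some (pvGetPl e)) cleaned else pvLoopB rest none cleaned
      else if t = "UNDO_ACCEPTED" || t = "UNDO_DENIED" then pvLoopB rest none cleaned
      else pvLoopB rest none (cleaned ++ [e])

def strip_undone_events_py_alt (logs : List (List (String × String))) : List (List (String × String)) :=
  pvLoopB (logs.zip (pvFlags logs).1) none []

-- ===== PRECONDITION & SPEC =====
def Spec_strip_undone_events_py (logs : List (List (String × String))) (out : List (List (String × String))) : Prop := out = strip_undone_events_py_alt logs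
instance (logs : List (List (String × String))) (out : List (List (String × String))) : Decidable (Spec_strip_undone_events_py logs out) := by unfold Spec_strip_undone_events_py; infer_instance

-- ===== CLAIM (what is proved, stated in full; the proofs are below) =====
def Claim_equal_strip_undone_events_py : Prop := ∀ (logs : List (List (String × String))), Dom_strip_undone_events_py logs → Spec_strip_undone_events_py logs (strip_undone_events_py logs)

-- ===== LEMMAS AND PROOFS =====

-- pass 1's running value is 'some resolution occurs in the list'
theorem pvFlags_snd (l : List (List (String × String))) : (pvFlags l).2 = l.any pvIsRes := by
  induction l with
  | nil => rfl
  | cons e rest ih => simp [pvFlags, ih, Bool.or_comm]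

-- A's lookahead finds nothing exactly when no resolution occurs
theorem pvScanRes_none_iff (l : List (List (String × String))) :
    pvScanRes l = none ↔ l.any pvIsRes = false := by
  induction l with
  | nil => simp [pvScanRes]
  | cons e rest ih =>
    simp only [pvScanRes, pvIsRes, List.any_cons]
    by_cases h1 : pvGetTy e = "UNDO_ACCEPTED" <;> by_cases h2 : pvGetTy e = "UNDO_DENIED" <;>
      simp [h1, h2] <;> cases hs : pvScanRes rest <;> simp_all

-- consuming a pending undo in pass 2 = jumping past A's lookahead
theorem pvLoopB_pending (l : List (List (String × String))) (k : Nat) (b : Bool)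
    (h : pvScanRes l = some (k, b)) (p : Option String) (cleaned : List (List (String × String))) :
    pvLoopB (l.zip (pvFlags l).1) (some p) cleaned =
      pvLoopB ((l.drop k).zip (pvFlags (l.drop k)).1) none
        (if b then pvPopLast cleaned p else cleaned) := by
  induction l generalizing k b cleaned with
  | nil => simp [pvScanRes] at h
  | cons e rest ih =>
    simp only [pvScanRes] at h
    by_cases h1 : pvGetTy e = "UNDO_ACCEPTED"
    · simp [h1] at h
      obtain ⟨hk, hb⟩ := h
      subst hk hb
      simp [pvFlags, pvLoopB, h1]
    · by_cases h2 : pvGetTy e = "UNDO_DENIED"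
      · simp [h2] at h
        obtain ⟨hk, hb⟩ := h
        subst hk hb
        simp [pvFlags, pvLoopB, h2]
      · cases hs : pvScanRes rest with
        | none => simp [h1, h2, hs] at h
        | some kb =>
          obtain ⟨k', b'⟩ := kb
          simp [h1, h2, hs] at h
          obtain ⟨hk, hb⟩ := h
          subst hb
          have hk' : k = k' + 1 := by omega
          subst hk'
          simpa [pvFlags, pvLoopB, h1, h2] using ih k' b' hs cleaned

-- the two main loops agree on every suffix and accumulator
theorem pvLoop_eq (n : Nat) : ∀ (l : List (List (String × String))), l.length ≤ n →
    ∀ cleaned, pvLoopA l cleaned = pvLoopB (l.zip (pvFlags l).1) none cleaned := by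
  induction n with
  | zero =>
    intro l hl cleaned
    have : l = [] := List.eq_nil_of_length_eq_zero (by omega)
    subst this; simp [pvLoopA, pvLoopB]
  | succ n ih =>
    intro l hl cleaned
    cases l with
    | nil => simp [pvLoopA, pvLoopB]
    | cons e rest =>
      simp only [List.length_cons] at hl
      by_cases ht : pvGetTy e = "UNDO_REQUESTED"
      · cases hs : pvScanRes rest with
        | none =>
          have hf : (pvFlags rest).2 = false := by
            rw [pvFlags_snd]; exact (pvScanRes_none_iff rest).mp hs
          rw [pvLoopA]
          simp [ht, hs, pvFlags, pvLoopB, hf, ih rest (by omega)]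
        | some kb =>
          obtain ⟨k, b⟩ := kb
          have hf : (pvFlags rest).2 = true := by
            rw [pvFlags_snd]
            by_contra hc
            simp only [Bool.not_eq_true] at hc
            rw [(pvScanRes_none_iff rest).mpr hc] at hs
            simp at hs
          have hdrop : (rest.drop k).length ≤ n := by
            have := List.length_drop (l := rest) (i := k); omega
          rw [pvLoopA]
          cases b with
          | true =>
            simp [ht, hs, pvFlags, pvLoopB, hf, pvLoopB_pending rest k true hs,
              ih (rest.drop k) hdrop]
          | false =>
            simp [ht, hs, pvFlags, pvLoopB, hf, pvLoopB_pending rest k false hs,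
              ih (rest.drop k) hdrop]
      · by_cases hA : pvGetTy e = "UNDO_ACCEPTED"
        · rw [pvLoopA]
          simp [hA, pvFlags, pvLoopB, ih rest (by omega)]
        · by_cases hD : pvGetTy e = "UNDO_DENIED"
          · rw [pvLoopA]
            simp [hD, pvFlags, pvLoopB, ih rest (by omega)]
          · rw [pvLoopA]
            simp [ht, hA, hD, pvFlags, pvLoopB, ih rest (by omega)]

-- ===== VERDICT (by name: the statement is the Claim_ definition above) =====
theorem strip_undone_events_py_spec : Claim_equal_strip_undone_events_py := by
  intro logs _
  unfold Spec_strip_undone_events_py strip_undone_events_py strip_undone_events_py_alt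
  exact pvLoop_eq logs.length logs le_rfl []
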